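-- pv_equiv track=rewrite | github.com/Emrys-Hong/pdtb3-mapper | csv2conll.py | get_token_list
-- ===== SOURCE A (Python) =====
-- from collections import OrderedDict
--
-- def get_token_list(char_span_list, doc_word_dict):
--     tokenlist = []
--     doc_word_dict = OrderedDict(sorted(doc_word_dict.items()), keys=lambda x:x[0][0])
--     for span in char_span_list:
--         for key, value in doc_word_dict.items():
--             if type(key) == str:
--                 continue
--             if key[1] > span[1]:
--                 break
--             if key[0] >= span[0]:
--                 tokenlist.append(value)
--
--     return tokenlist
-- ===== SOURCE B (Python) =====
-- from bisect import bisect_left, bisect_right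
-- from itertools import accumulate
--
--
-- def get_token_list(char_span_list, doc_word_dict):
--     if not char_span_list:
--         return []
--     if not doc_word_dict:
--         return []
--     items = sorted(doc_word_dict.items(), key=lambda kv: kv[0])
--     starts = [key[0] for key, _ in items]
--     ends = [key[1] for key, _ in items]
--     pmax = list(accumulate(ends, max))  # prefix maximum of the span ends
--     values = [value for _, value in items]
--     out = []
--     for span in char_span_list:
--         # tokens scanned before A's break: prefix while running-max end <= span[1]
--         brk = bisect_right(pmax, span[1])
--         # within that prefix, starts are sorted; keep those with start >= span[0]
--         lo = bisect_left(starts, span[0])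
--         out += values[lo:brk]
--     return out
-- ===== Notes on version B (the rewrite author's own statement) =====
-- stated objective: faster
-- what changed: A rescans the whole sorted dict for every span; B sorts once, precomputes the prefix-maximum of span ends, and answers each span with two binary searches (bisect_right on the prefix-max ends for A's break point, bisect_left on the sorted starts) emitting a contiguous slice of values.
-- outside the precondition, e.g. on get_token_list([(0, 1)], {(0, 5): 'a', (20,): 'z'}): A returns [], B raises IndexError
import Mathlib
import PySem

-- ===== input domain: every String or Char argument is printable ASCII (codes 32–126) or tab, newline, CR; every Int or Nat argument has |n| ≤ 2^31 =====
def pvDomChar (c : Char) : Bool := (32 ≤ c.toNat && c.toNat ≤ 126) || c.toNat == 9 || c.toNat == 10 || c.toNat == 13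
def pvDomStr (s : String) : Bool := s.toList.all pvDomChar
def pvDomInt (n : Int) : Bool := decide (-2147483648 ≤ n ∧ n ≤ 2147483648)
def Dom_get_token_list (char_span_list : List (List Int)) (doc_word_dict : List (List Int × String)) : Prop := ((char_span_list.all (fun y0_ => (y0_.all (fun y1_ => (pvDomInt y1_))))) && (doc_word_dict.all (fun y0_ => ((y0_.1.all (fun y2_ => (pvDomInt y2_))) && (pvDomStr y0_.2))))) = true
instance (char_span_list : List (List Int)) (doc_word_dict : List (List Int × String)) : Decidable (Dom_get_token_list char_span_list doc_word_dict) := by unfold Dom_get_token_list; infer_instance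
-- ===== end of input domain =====

-- B replaces A's per-span rescan of the whole sorted dict by one sort plus, per span, two binary
-- searches (on the prefix-maximum of key ends and on the sorted key starts) emitting a slice.


-- ===== PORT A =====
-- Inner 'for key, value in doc_word_dict.items():' loop with its break, as structural recursion.
-- The 'keys=lambda …' kwarg of A's OrderedDict call only adds a str-keyed entry that the
-- 'type(key) == str: continue' line always skips, so neither appears in the port (keys here are
-- tuples of ints, i.e. List Int).  Indexing key[0]/key[1]/span[0]/span[1] is pyGetD with default 0:
-- exact on Pre_, which guarantees the indexed lists have length ≥ 2 wherever Python indexes them.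
def pvAInner (span : List Int) : List (List Int × String) → List String → List String
  | [], acc => acc
  | (key, value) :: rest, acc =>
    if PySem.List.pyGetD span 1 0 < PySem.List.pyGetD key 1 0 then acc
    else if PySem.List.pyGetD span 0 0 ≤ PySem.List.pyGetD key 0 0 then
      pvAInner span rest (acc ++ [value])
    else pvAInner span rest acc

-- sorted(doc_word_dict.items()) compares pairs; dict keys are distinct, so it equals the stable
-- sort by the key tuple alone (the values are never compared).
def get_token_list (char_span_list : List (List Int)) (doc_word_dict : List (List Int × String)) : List String :=
  let d := PySem.List.sorted (PySem.Dict.ofList doc_word_dict).items (fun p => p.1)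
  char_span_list.foldl (fun acc span => pvAInner span d acc) []

-- ===== PORT B =====
-- Hand port of itertools.accumulate(ends, max): running maxima (exact; [] on []).
def pvRunMax : Int → List Int → List Int
  | _, [] => []
  | m, e :: rest => (max m e) :: pvRunMax (max m e) rest

def pvPrefixMax : List Int → List Int
  | [] => []
  | e :: rest => e :: pvRunMax e rest

def get_token_list_alt (char_span_list : List (List Int)) (doc_word_dict : List (List Int × String)) : List String :=
  if char_span_list = [] then []
  else if doc_word_dict = [] then []
  else
    let items := PySem.List.sorted (PySem.Dict.ofList doc_word_dict).items (fun p => p.1)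
    let starts := items.map (fun p => PySem.List.pyGetD p.1 0 0)
    let pmax := pvPrefixMax (items.map (fun p => PySem.List.pyGetD p.1 1 0))
    let values := items.map (fun p => p.2)
    char_span_list.foldl (fun acc span =>
      let brk := PySem.List.bisectRight pmax (PySem.List.pyGetD span 1 0)
      let lo := PySem.List.bisectLeft starts (PySem.List.pyGetD span 0 0)
      acc ++ PySem.List.slice values (some (lo : Int)) (some (brk : Int))) []

-- ===== PRECONDITION & SPEC =====
-- Pre_ excludes inputs where some span or some dict key has fewer than two components: on these A
-- raises IndexError, except on degenerate inputs where the short key hides behind the break of the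
-- inner loop (A returns there, but B's preprocessing, which reads every key, raises).
def Pre_get_token_list (char_span_list : List (List Int)) (doc_word_dict : List (List Int × String)) : Prop :=
  char_span_list = [] ∨ doc_word_dict = [] ∨
    ((∀ s ∈ char_span_list, 2 ≤ s.length) ∧ (∀ kv ∈ doc_word_dict, 2 ≤ kv.1.length))
instance (char_span_list : List (List Int)) (doc_word_dict : List (List Int × String)) : Decidable (Pre_get_token_list char_span_list doc_word_dict) := by unfold Pre_get_token_list; infer_instance

def pvWitness_get_token_list : List (List Int) × (List (List Int × String)) :=
  ([[0, 5]], [([0, 2], "a")])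

def Spec_get_token_list (char_span_list : List (List Int)) (doc_word_dict : List (List Int × String)) (out : List String) : Prop := out = get_token_list_alt char_span_list doc_word_dict
instance (char_span_list : List (List Int)) (doc_word_dict : List (List Int × String)) (out : List String) : Decidable (Spec_get_token_list char_span_list doc_word_dict out) := by unfold Spec_get_token_list; infer_instance

-- ===== CLAIM (what is proved, stated in full; the proofs are below) =====
def Claim_equal_get_token_list : Prop := ∀ (char_span_list : List (List Int)) (doc_word_dict : List (List Int × String)), Dom_get_token_list char_span_list doc_word_dict → Pre_get_token_list char_span_list doc_word_dict → Spec_get_token_list char_span_list doc_word_dict (get_token_list char_span_list doc_word_dict)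

-- ===== LEMMAS AND PROOFS =====

-- abbreviations used throughout the proofs
def pvSt (kv : List Int × String) : Int := PySem.List.pyGetD kv.1 0 0
def pvEn (kv : List Int × String) : Int := PySem.List.pyGetD kv.1 1 0

theorem pvMemFoldlInsert (l : List (List Int × String)) :
    ∀ (d : PySem.Dict (List Int) String) (p : List Int × String),
      p ∈ (l.foldl (fun d kv => d.insert kv.1 kv.2) d).items → p ∈ d.items ∨ p ∈ l := by
  induction l with
  | nil => intro d p h; exact Or.inl h
  | cons kv rest ih =>
    intro d p h
    rcases ih (d.insert kv.1 kv.2) p h with h' | h'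
    · rcases (PySem.Dict.mem_items_insert _ _ _ p).mp h' with h'' | ⟨h'', _⟩
      · exact Or.inr (by simp [h''])
      · exact Or.inl h''
    · right; right; exact h'

theorem pvMemOfList (l : List (List Int × String)) (p : List Int × String)
    (h : p ∈ (PySem.Dict.ofList l).items) : p ∈ l := by
  have := pvMemFoldlInsert l PySem.Dict.empty p (by exact h)
  simpa [PySem.Dict.empty] using this

theorem pvSortedKeysPairwise (items : List (List Int × String)) :
    List.Pairwise (fun a b => a.1 ≤ b.1) (PySem.List.sorted items (fun p => p.1)) := by
  have h := PySem.List.sorted_pairwise (κ := List Int) items (fun p => p.1)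
  convert h using 2

theorem pvGetD0_cons (x : Int) (xs : List Int) : PySem.List.pyGetD (x::xs) 0 0 = x := by
  simp [PySem.List.pyGetD, PySem.List.pyIdx?, PySem.List.pyGet?]

theorem pvLexHead (a b : List Int) (h : a ≤ b) (ha : a ≠ []) :
    PySem.List.pyGetD a 0 0 ≤ PySem.List.pyGetD b 0 0 := by
  cases a with
  | nil => exact absurd rfl ha
  | cons x xs =>
    cases b with
    | nil =>
      exfalso
      rcases le_iff_lt_or_eq.mp h with h' | h'
      · cases h'
      · cases h' 
    | cons y ys =>
      rw [pvGetD0_cons, pvGetD0_cons]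
      rcases le_iff_lt_or_eq.mp h with h' | h'
      · cases h' with
        | _ => omega
      · simp_all

theorem pvAInnerChar (span : List Int) (l : List (List Int × String)) (acc : List String) :
    pvAInner span l acc = acc ++
      ((l.takeWhile (fun kv => decide (pvEn kv ≤ PySem.List.pyGetD span 1 0))).filter
        (fun kv => decide (PySem.List.pyGetD span 0 0 ≤ pvSt kv))).map (fun kv => kv.2) := by
  induction l generalizing acc with
  | nil => simp [pvAInner]
  | cons kv rest ih =>
    obtain ⟨key, value⟩ := kv
    by_cases h1 : PySem.List.pyGetD span 1 0 < PySem.List.pyGetD key 1 0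
    · simp [pvAInner, h1, List.takeWhile_cons, pvEn, not_le.mpr h1]
    · by_cases h2 : PySem.List.pyGetD span 0 0 ≤ PySem.List.pyGetD key 0 0
      · simp only [pvAInner, if_neg h1, if_pos h2, ih, List.takeWhile_cons]
        simp [pvEn, pvSt, not_lt.mp h1, h2, List.filter_cons]
      · simp only [pvAInner, if_neg h1, if_neg h2, ih, List.takeWhile_cons]
        simp [pvEn, pvSt, not_lt.mp h1, h2, List.filter_cons]

theorem pvRunMax_length (m : Int) (es : List Int) : (pvRunMax m es).length = es.length := by
  induction es generalizing m with
  | nil => rfl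
  | cons e rest ih => simp [pvRunMax, ih]

theorem pvPrefixMax_length (es : List Int) : (pvPrefixMax es).length = es.length := by
  cases es with
  | nil => rfl
  | cons e rest => simp [pvPrefixMax, pvRunMax_length]

theorem pvRunMax_pairwise (m : Int) (es : List Int) :
    List.Pairwise (· ≤ ·) (pvRunMax m es) ∧ ∀ y ∈ pvRunMax m es, m ≤ y := by
  induction es generalizing m with
  | nil => simp [pvRunMax]
  | cons e rest ih =>
    obtain ⟨hp, hy⟩ := ih (max m e)
    refine ⟨List.pairwise_cons.mpr ⟨fun y hy' => ?_, hp⟩, ?_⟩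
    · exact hy y hy'
    · intro y hy'
      rcases List.mem_cons.mp hy' with rfl | hy''
      · exact le_max_left _ _
      · exact le_trans (le_max_left _ _) (hy y hy'')

theorem pvPrefixMax_pairwise (es : List Int) : List.Pairwise (· ≤ ·) (pvPrefixMax es) := by
  cases es with
  | nil => simp [pvPrefixMax]
  | cons e rest =>
    obtain ⟨hp, hy⟩ := pvRunMax_pairwise e rest
    exact List.pairwise_cons.mpr ⟨fun y h => hy y h, hp⟩

theorem pvRunMax_le_iff (es : List Int) : ∀ (m x : Int) (j : Nat) (h : j < es.length),
    ((pvRunMax m es)[j]'(by rw [pvRunMax_length]; exact h) ≤ x ↔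
      (m ≤ x ∧ ∀ i (hi : i < es.length), i ≤ j → es[i] ≤ x)) := by
  induction es with
  | nil => intro m x j h; simp at h
  | cons e rest ih =>
    intro m x j h
    cases j with
    | zero =>
      simp only [pvRunMax, List.getElem_cons_zero, max_le_iff]
      constructor
      · rintro ⟨h1, h2⟩
        refine ⟨h1, fun i hi hle => ?_⟩
        cases i with
        | zero => simpa using h2
        | succ n => omega
      · rintro ⟨h1, h2⟩
        exact ⟨h1, by simpa using h2 0 (by simp) (by omega)⟩
    | succ k =>
      have hk : k < rest.length := by simpa using h
      have := ih (max m e) x k hk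
      simp only [pvRunMax, List.getElem_cons_succ] at this ⊢
      rw [this]
      constructor
      · rintro ⟨h1, h2⟩
        refine ⟨le_trans (le_max_left _ _) h1, ?_⟩
        intro i hi hle
        cases i with
        | zero => simpa using le_trans (le_max_right _ _) h1
        | succ i' => exact h2 i' (by simpa using hi) (by omega)
      · rintro ⟨h1, h2⟩
        refine ⟨max_le h1 (by simpa using h2 0 (by simp) (by omega)), ?_⟩
        intro i hi hle
        exact h2 (i+1) (by simpa using hi) (by omega)

theorem pvPrefixMax_le_iff (es : List Int) (x : Int) (j : Nat) (h : j < es.length) :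
    ((pvPrefixMax es)[j]'(by rw [pvPrefixMax_length]; exact h) ≤ x ↔
      ∀ i (hi : i < es.length), i ≤ j → es[i] ≤ x) := by
  cases es with
  | nil => simp at h
  | cons e rest =>
    cases j with
    | zero =>
      simp only [pvPrefixMax, List.getElem_cons_zero]
      constructor
      · intro h1 i hi hle
        cases i with
        | zero => simpa using h1
        | succ n => omega
      · intro h1; simpa using h1 0 (by simp) (by omega)
    | succ k =>
      have hk : k < rest.length := by simpa using h
      have := pvRunMax_le_iff rest e x k hk
      simp only [pvPrefixMax, List.getElem_cons_succ]
      rw [this]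
      constructor
      · rintro ⟨h1, h2⟩ i hi hle
        cases i with
        | zero => simpa using h1
        | succ i' => exact h2 i' (by simpa using hi) (by omega)
      · intro h2
        refine ⟨by simpa using h2 0 (by simp) (by omega), ?_⟩
        intro i hi hle
        exact h2 (i+1) (by simpa using hi) (by omega)

theorem pvTakeWhileLe {α : Type} (p : α → Bool) (l : List α) : (l.takeWhile p).length ≤ l.length :=
  (List.takeWhile_prefix p).length_le
theorem pvTakeWhileTrue {α : Type} (p : α → Bool) (l : List α) (j : Nat)
    (hj : j < l.length) (h : j < (l.takeWhile p).length) : p l[j] = true := by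
  induction l generalizing j with
  | nil => simp at hj
  | cons x xs ih =>
    by_cases hx : p x
    · cases j with
      | zero => simpa using hx
      | succ k =>
        simp [List.takeWhile_cons, hx] at h
        exact ih k (by simpa using hj) (by omega)
    · simp [List.takeWhile_cons, hx] at h
theorem pvTakeWhileFalse {α : Type} (p : α → Bool) (l : List α)
    (h : (l.takeWhile p).length < l.length) : p (l[(l.takeWhile p).length]) = false := by
  induction l with
  | nil => simp at h
  | cons x xs ih =>
    by_cases hx : p x
    · simp only [List.takeWhile_cons, hx, if_true, List.length_cons]
      simpa using ih (by simpa [List.takeWhile_cons, hx] using h)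
    · simpa [List.takeWhile_cons, hx] using hx
theorem pvFilterEqDrop {α : Type} (q : α → Bool) (l : List α) (n : Nat)
    (h : ∀ j (hj : j < l.length), q l[j] = true ↔ n ≤ j) : l.filter q = l.drop n := by
  induction l generalizing n with
  | nil => simp
  | cons x xs ih =>
    cases n with
    | zero =>
      rw [List.drop_zero, List.filter_eq_self]
      intro a ha
      rcases List.mem_iff_getElem.mp ha with ⟨j, hj, rfl⟩
      exact (h j hj).mpr (by omega)
    | succ m =>
      have hx : q x = false := by
        have := h 0 (by simp)
        simp at this; omega
      rw [List.drop_succ_cons, List.filter_cons_of_neg (by simp [hx])]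
      exact ih m (fun j hj => by simpa using h (j+1) (by simpa using hj))

theorem pvBrkEq (items : List (List Int × String)) (s1 : Int) :
    PySem.List.bisectRight (pvPrefixMax (items.map pvEn)) s1 =
      (items.takeWhile (fun kv => decide (pvEn kv ≤ s1))).length := by
  set es := items.map pvEn with hes
  have hlen : (pvPrefixMax es).length = items.length := by rw [pvPrefixMax_length, hes, List.length_map]
  obtain ⟨hr1, hr2, hr3⟩ := PySem.List.bisectRight_spec (pvPrefixMax es) s1 (pvPrefixMax_pairwise es)
  set r := PySem.List.bisectRight (pvPrefixMax es) s1 with hrdef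
  set t := (items.takeWhile (fun kv => decide (pvEn kv ≤ s1))).length with htdef
  have ht : t ≤ items.length := pvTakeWhileLe _ _
  rcases Nat.lt_trichotomy r t with h | h | h
  · exfalso
    have hrlen : r < items.length := lt_of_lt_of_le h ht
    have h3 := hr3 r (by omega) (le_refl r)
    have hall : ∀ i (hi : i < es.length), i ≤ r → es[i] ≤ s1 := by
      intro i hi hile
      have hi' : i < items.length := by simpa [hes] using hi
      have := pvTakeWhileTrue (fun kv => decide (pvEn kv ≤ s1)) items i hi' (by rw [← htdef]; omega)
      simp only [hes, List.getElem_map]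
      simpa using this
    have hle := (pvPrefixMax_le_iff es s1 r (by simpa [hes] using hrlen)).mpr hall
    exact absurd hle (not_le.mpr h3)
  · exact h
  · exfalso
    have htlen : t < items.length := lt_of_lt_of_le h (by omega)
    have h2 := hr2 t (by omega) h
    have := (pvPrefixMax_le_iff es s1 t (by simpa [hes] using htlen)).mp h2
    have h4 := this t (by simpa [hes] using htlen) (le_refl t)
    have h5 := pvTakeWhileFalse (fun kv => decide (pvEn kv ≤ s1)) items htlen
    simp only [hes, List.getElem_map] at h4
    simp only [← htdef] at h5
    simp at h5
    omega

theorem pvSpanEq (items : List (List Int × String)) (s0 s1 : Int)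
    (hkey : ∀ kv ∈ items, kv.1 ≠ [])
    (hpw : List.Pairwise (fun a b => a.1 ≤ b.1) items) :
    ((items.takeWhile (fun kv => decide (pvEn kv ≤ s1))).filter
        (fun kv => decide (s0 ≤ pvSt kv))).map (fun kv => kv.2) =
      PySem.List.slice (items.map (fun p => p.2))
        (some ((PySem.List.bisectLeft (items.map (fun p => PySem.List.pyGetD p.1 0 0)) s0 : Nat) : Int))
        (some ((PySem.List.bisectRight (pvPrefixMax (items.map (fun p => PySem.List.pyGetD p.1 1 0))) s1 : Nat) : Int)) := by
  have hbrk := pvBrkEq items s1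
  set t := (items.takeWhile (fun kv => decide (pvEn kv ≤ s1))).length with htdef
  have ht : t ≤ items.length := pvTakeWhileLe _ _
  set starts := items.map (fun p => PySem.List.pyGetD p.1 0 0) with hst
  have hstpw : List.Pairwise (fun a b => a ≤ b) starts := by
    rw [hst]
    exact List.pairwise_map.mpr
      (hpw.imp_of_mem (fun {a b} ha _ h => pvLexHead a.1 b.1 h (hkey a ha)))
  obtain ⟨hl1, hl2, hl3⟩ := PySem.List.bisectLeft_spec starts s0 hstpw
  set lo := PySem.List.bisectLeft starts s0 with hlodef
  have hslen : starts.length = items.length := by rw [hst, List.length_map]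
  -- takeWhile is take t
  have htw : items.takeWhile (fun kv => decide (pvEn kv ≤ s1)) = items.take t :=
    List.prefix_iff_eq_take.mp (List.takeWhile_prefix _)
  -- filter is drop lo
  have hfd : (items.take t).filter (fun kv => decide (s0 ≤ pvSt kv)) = (items.take t).drop lo := by
    apply pvFilterEqDrop
    intro j hj
    have hj' : j < items.length := by simp [List.length_take] at hj; omega
    rw [List.getElem_take]
    constructor
    · intro hq
      by_contra hlt
      have := hl2 j (by omega) (by omega)
      simp only [hst, List.getElem_map] at this
      simp [pvSt] at hq
      omega
    · intro hle
      have := hl3 j (by omega) hle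
      simp only [hst, List.getElem_map] at this
      simp [pvSt]
      omega
  have hbrk' : PySem.List.bisectRight (pvPrefixMax (items.map (fun p => PySem.List.pyGetD p.1 1 0))) s1 = t := hbrk
  rw [htw, hfd, hbrk', PySem.List.slice_natCast]
  simp only [List.map_drop, List.map_take, List.drop_take]


theorem pvMain : ∀ (csl : List (List Int)) (dwd : List (List Int × String)),
    (csl = [] ∨ dwd = [] ∨ ((∀ s ∈ csl, 2 ≤ s.length) ∧ (∀ kv ∈ dwd, 2 ≤ kv.1.length))) →
    get_token_list csl dwd = get_token_list_alt csl dwd := by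
  intro csl dwd hpre
  by_cases hc : csl = []
  · subst hc; simp [get_token_list, get_token_list_alt]
  · by_cases hd : dwd = []
    · subst hd
      have hB : get_token_list_alt csl [] = [] := by simp [get_token_list_alt, hc]
      have hA : get_token_list csl [] = [] := by
        show csl.foldl (fun acc _ => acc) [] = []
        exact PySem.List.foldl_ignore csl []
      rw [hA, hB]
    · have hshape : (∀ s ∈ csl, 2 ≤ s.length) ∧ (∀ kv ∈ dwd, 2 ≤ kv.1.length) := by
        rcases hpre with h | h | h
        · exact absurd h hc
        · exact absurd h hd
        · exact h
      unfold get_token_list get_token_list_alt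
      rw [if_neg hc, if_neg hd]
      set items := PySem.List.sorted (PySem.Dict.ofList dwd).items (fun p => p.1) with hitems
      have hkey : ∀ kv ∈ items, kv.1 ≠ [] := by
        intro kv hkv'
        have hmem : kv ∈ dwd :=
          pvMemOfList dwd kv ((PySem.List.mem_sorted _ _ _ _).mp (by rw [← hitems]; exact hkv'))
        have h2 := hshape.2 kv hmem
        intro hnil
        rw [hnil] at h2
        simp at h2
      have hpw : List.Pairwise (fun a b => a.1 ≤ b.1) items := by
        rw [hitems]; exact pvSortedKeysPairwise _
      simp only [pvAInnerChar, PySem.List.foldl_append_eq_flatMap, List.nil_append]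
      exact List.flatMap_congr (fun span _ =>
        pvSpanEq items (PySem.List.pyGetD span 0 0) (PySem.List.pyGetD span 1 0) hkey hpw)

-- ===== VERDICT (by name: the statement is the Claim_ definition above) =====
theorem get_token_list_spec : Claim_equal_get_token_list := by
  intro csl dwd _ hpre
  show get_token_list csl dwd = get_token_list_alt csl dwd
  exact pvMain csl dwd hpre
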